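-- pv_equiv track=rewrite | github.com/Midhilesh4890/Leetcode-Problems | Google/accounts_mege_variant.py | find_similar_videos
-- ===== SOURCE A (Python) =====
-- from collections import defaultdict
--
-- def find_similar_videos(videos, query_index):
--     tag_to_videos = defaultdict(list)
--
--     # Process all videos that come before the query video.
--     # We only care about these because the problem states that we only compare with previous videos.
--     for i in range(query_index):
--         for tag in videos[i]:
--             # Append the current video's index to the list for this tag.
--             tag_to_videos[tag].append(i)
--
--     # Initialize a set to store indices of videos that share at least one tag with the query video.
--     # A set is used to avoid duplicate indices in case multiple tags match.
--     similar_videos = set()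
--
--     # Look at each tag in the query video's tag list.
--     for tag in videos[query_index]:
--         # For the current tag, retrieve all videos (from the mapping) that have this tag.
--         for vid in tag_to_videos[tag]:
--             similar_videos.add(vid)
--
--     # Return a sorted list of similar video indices for consistency in ordering.
--     return sorted(similar_videos)
-- ===== SOURCE B (Python) =====
-- def find_similar_videos(videos, query_index):
--     query_tags = set(videos[query_index])
--     return [i for i in range(query_index)
--             if any(tag in query_tags for tag in videos[i])]
-- ===== Notes on version B (the rewrite author's own statement) =====
-- stated objective: simpler
-- what changed: Instead of building a tag->prior-videos inverted index and collecting matches into a set that is then sorted, B puts the query video's tags into a set once and does a single ascending scan over the prior videos, keeping each index that shares a tag (the output is already sorted and duplicate-free by construction).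
import Mathlib
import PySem

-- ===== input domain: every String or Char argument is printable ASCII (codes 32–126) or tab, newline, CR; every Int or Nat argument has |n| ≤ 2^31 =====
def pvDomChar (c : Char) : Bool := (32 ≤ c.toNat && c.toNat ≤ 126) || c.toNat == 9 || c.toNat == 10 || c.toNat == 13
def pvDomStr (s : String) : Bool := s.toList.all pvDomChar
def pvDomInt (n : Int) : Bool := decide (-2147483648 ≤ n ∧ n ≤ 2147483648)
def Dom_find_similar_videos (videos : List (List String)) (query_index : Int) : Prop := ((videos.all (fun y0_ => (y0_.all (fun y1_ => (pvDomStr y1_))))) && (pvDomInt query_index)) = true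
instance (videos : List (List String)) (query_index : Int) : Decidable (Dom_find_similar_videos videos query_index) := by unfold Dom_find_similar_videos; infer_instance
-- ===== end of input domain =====

-- B replaces A's tag→prior-videos inverted index + match set + sort with a single ascending scan
-- of the prior videos against a set of the query video's tags (objective: simpler).

-- ===== PORT A =====
def find_similar_videos (videos : List (List String)) (query_index : Int) : List Int :=
  -- tag_to_videos = defaultdict(list); for i in range(query_index): for tag in videos[i]: tag_to_videos[tag].append(i)
  let tag_to_videos : PySem.Dict String (List Int) :=
    (PySem.List.pyRange 0 query_index 1).foldl (fun d i =>
      ((PySem.List.pyGet? videos i).getD []).foldl (fun d tag =>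
        d.modify tag [] (fun l => l ++ [i])) d) PySem.Dict.empty
  -- similar_videos = set(); for tag in videos[query_index]: for vid in tag_to_videos[tag]: similar_videos.add(vid)
  let similar_videos : PySem.Set Int :=
    ((PySem.List.pyGet? videos query_index).getD []).foldl (fun s tag =>
      (tag_to_videos.getD tag []).foldl (fun s vid => PySem.Set.add s vid) s)
      PySem.Set.empty
  -- return sorted(similar_videos)
  PySem.List.sorted similar_videos (fun x => x) false

-- ===== PORT B =====
def find_similar_videos_alt (videos : List (List String)) (query_index : Int) : List Int :=
  -- query_tags = set(videos[query_index])
  let query_tags : PySem.Set String :=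
    PySem.Set.ofList ((PySem.List.pyGet? videos query_index).getD [])
  -- [i for i in range(query_index) if any(tag in query_tags for tag in videos[i])]
  (PySem.List.pyRange 0 query_index 1).filter (fun i =>
    ((PySem.List.pyGet? videos i).getD []).any (fun tag => PySem.Set.contains query_tags tag))

-- ===== PRECONDITION & SPEC =====
-- A raises IndexError exactly when query_index is out of range for videos (a too-large
-- query_index already fails at videos[i] inside its first loop); those inputs are excluded.
def Pre_find_similar_videos (videos : List (List String)) (query_index : Int) : Prop :=
  PySem.Raise.InRange videos.length query_index
instance (videos : List (List String)) (query_index : Int) : Decidable (Pre_find_similar_videos videos query_index) := by unfold Pre_find_similar_videos; infer_instance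

def pvWitness_find_similar_videos : List (List String) × Int :=
  ([["a", "b"], ["c"], ["b", "x"]], 2)

def Spec_find_similar_videos (videos : List (List String)) (query_index : Int) (out : List Int) : Prop := out = find_similar_videos_alt videos query_index
instance (videos : List (List String)) (query_index : Int) (out : List Int) : Decidable (Spec_find_similar_videos videos query_index out) := by unfold Spec_find_similar_videos; infer_instance

-- ===== CLAIM (what is proved, stated in full; the proofs are below) =====
def Claim_equal_find_similar_videos : Prop := ∀ (videos : List (List String)) (query_index : Int), Dom_find_similar_videos videos query_index → Pre_find_similar_videos videos query_index → Spec_find_similar_videos videos query_index (find_similar_videos videos query_index)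

-- ===== LEMMAS AND PROOFS =====

-- videos[i] as A's and B's loops read it (total form; the loops only touch in-range i)
def gtags (videos : List (List String)) (i : Int) : List String :=
  (PySem.List.pyGet? videos i).getD []

-- A's inverted index, looked up at a tag: exactly the prior indices whose video carries that tag
lemma mem_idx (videos : List (List String)) (qi : Int) (tag : String) (v : Int) :
    v ∈ ((PySem.List.pyRange 0 qi 1).foldl (fun d i =>
        (gtags videos i).foldl (fun d t => d.modify t [] (fun l => l ++ [i])) d)
        (PySem.Dict.empty : PySem.Dict String (List Int))).getD tag []
    ↔ ∃ i ∈ PySem.List.pyRange 0 qi 1, tag ∈ gtags videos i ∧ v = i := by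
  have hfold : (PySem.List.pyRange 0 qi 1).foldl (fun d i =>
        (gtags videos i).foldl (fun d t => d.modify t [] (fun l => l ++ [i])) d)
        (PySem.Dict.empty : PySem.Dict String (List Int))
      = ((PySem.List.pyRange 0 qi 1).flatMap (fun i => (gtags videos i).map (fun t => (t, i)))).foldl
          (fun d p => d.modify p.1 [] (fun l => l ++ [p.2])) PySem.Dict.empty := by
    rw [List.foldl_flatMap]
    congr 1
    funext d i
    rw [List.foldl_map]
  rw [hfold, PySem.Dict.getD_foldl_modify_append, PySem.Dict.getD_empty]
  simp only [List.nil_append, List.mem_map, List.mem_filter, List.mem_flatMap]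
  constructor
  · rintro ⟨⟨t, i⟩, ⟨⟨j, hj, ht⟩, heq⟩, rfl⟩
    simp only [Prod.mk.injEq] at ht
    obtain ⟨t', ht', rfl, rfl⟩ := ht
    simp only [beq_iff_eq] at heq
    subst heq
    exact ⟨j, hj, ht', rfl⟩
  · rintro ⟨i, hi, ht, rfl⟩
    exact ⟨(tag, v), ⟨⟨v, hi, by simp [ht]⟩, by simp⟩, rfl⟩

-- membership in A's match-set loop (a fold of set-updates)
lemma mem_fold_update (qt : List String) (F : String → List Int) (s0 : PySem.Set Int) (v : Int) :
    v ∈ qt.foldl (fun s tag => (F tag).foldl (fun s vid => PySem.Set.add s vid) s) s0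
    ↔ v ∈ s0 ∨ ∃ tag ∈ qt, v ∈ F tag := by
  induction qt generalizing s0 with
  | nil => simp
  | cons t ts ih =>
    simp only [List.foldl_cons, ih]
    have : ((F t).foldl (fun s vid => PySem.Set.add s vid) s0) = PySem.Set.update s0 (F t) := rfl
    rw [this, PySem.Set.mem_update]
    simp only [List.mem_cons]
    constructor
    · rintro ((h|h)|⟨tag,ht,hv⟩)
      · exact Or.inl h
      · exact Or.inr ⟨t, Or.inl rfl, h⟩
      · exact Or.inr ⟨tag, Or.inr ht, hv⟩
    · rintro (h|⟨tag,(rfl|ht),hv⟩)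
      · exact Or.inl (Or.inl h)
      · exact Or.inl (Or.inr hv)
      · exact Or.inr ⟨tag, ht, hv⟩

lemma nodup_fold_update (qt : List String) (F : String → List Int) (s0 : PySem.Set Int)
    (h : s0.Nodup) :
    (qt.foldl (fun s tag => (F tag).foldl (fun s vid => PySem.Set.add s vid) s) s0).Nodup := by
  induction qt generalizing s0 with
  | nil => exact h
  | cons t ts ih =>
    exact ih _ (by show (PySem.Set.update s0 (F t)).Nodup; exact PySem.Set.nodup_update s0 (F t) h)

-- the two ports agree on every input (the precondition only marks where the Python A returns)
lemma ports_agree (videos : List (List String)) (qi : Int) :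
    find_similar_videos videos qi = find_similar_videos_alt videos qi := by
  unfold find_similar_videos find_similar_videos_alt
  apply PySem.List.sorted_eq_of_perm_of_pairwise_lt
  · rw [List.perm_ext_iff_of_nodup]
    · intro v
      rw [List.mem_filter, mem_fold_update]
      show _ ↔ v ∈ PySem.Set.empty ∨ _
      simp only [PySem.Set.empty, List.not_mem_nil, false_or]
      rw [show (fun (d : PySem.Dict String (List Int)) (i : Int) =>
            List.foldl (fun d tag => d.modify tag [] (fun l => l ++ [i]))
              d ((PySem.List.pyGet? videos i).getD []))
          = (fun d i => (gtags videos i).foldl (fun d t => d.modify t [] (fun l => l ++ [i])) d)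
        from rfl]
      constructor
      · rintro ⟨hv, hany⟩
        simp only [List.any_eq_true, PySem.Set.contains_iff, PySem.Set.mem_ofList] at hany
        obtain ⟨tag, htag, htq⟩ := hany
        exact ⟨tag, htq, (mem_idx videos qi tag v).2 ⟨v, hv, htag, rfl⟩⟩
      · rintro ⟨tag, htq, hvi⟩
        obtain ⟨i, hi, htag, rfl⟩ := (mem_idx videos qi tag v).1 hvi
        refine ⟨hi, ?_⟩
        simp only [List.any_eq_true, PySem.Set.contains_iff, PySem.Set.mem_ofList]
        exact ⟨tag, htag, htq⟩
    · exact (PySem.List.nodup_pyRange_one 0 qi).filter _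
    · exact nodup_fold_update _ _ _ List.nodup_nil
  · exact (PySem.List.pairwise_lt_pyRange_one 0 qi).filter _

-- ===== VERDICT (by name: the statement is the Claim_ definition above) =====
theorem find_similar_videos_spec : Claim_equal_find_similar_videos := by
  intro videos qi _ _
  unfold Spec_find_similar_videos
  exact ports_agree videos qi
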